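-- pv_equiv track=rewrite | github.com/tamuzGitler/LeetCode-Practice | checkPoint/q2.py | solution
-- ===== SOURCE A (Python) =====
-- def solution(A):
--     min_num_of_room_needed = 0
--     demands = set()
--     A.sort()
--     for guestDemand in A:
--         demands.add(guestDemand)
--         demands = {demand - 1 for demand in demands}
--
--         if 0 in demands:
--             min_num_of_room_needed += 1
--             demands.clear()
--     if len(demands):
--         min_num_of_room_needed += 1
--     return min_num_of_room_needed
-- ===== SOURCE B (Python) =====
-- def solution(A):
--     # One pass over the sorted demands keeping only the earliest pending
--     # "hits zero" countdown instead of a whole set decremented every step.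
--     A.sort()
--     rooms = 0
--     countdown = None        # steps left until the current group's demand hits 0
--     open_group = False      # some demand seen since the last cleared group
--     for d in A:
--         if countdown is None and d >= 1:
--             countdown = d
--         open_group = True
--         if countdown is not None:
--             countdown -= 1
--             if countdown == 0:
--                 rooms += 1
--                 countdown = None
--                 open_group = False
--     if open_group:
--         rooms += 1
--     return rooms
-- ===== Notes on version B (the rewrite author's own statement) =====
-- stated objective: faster
-- what changed: A simulates a set of pending demands, rebuilding the whole set (decrementing every member) on each iteration; B sorts once and does a single pass keeping only a scalar countdown to the earliest demand that will hit zero plus an open-group flag, so no set is maintained at all.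
import Mathlib
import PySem

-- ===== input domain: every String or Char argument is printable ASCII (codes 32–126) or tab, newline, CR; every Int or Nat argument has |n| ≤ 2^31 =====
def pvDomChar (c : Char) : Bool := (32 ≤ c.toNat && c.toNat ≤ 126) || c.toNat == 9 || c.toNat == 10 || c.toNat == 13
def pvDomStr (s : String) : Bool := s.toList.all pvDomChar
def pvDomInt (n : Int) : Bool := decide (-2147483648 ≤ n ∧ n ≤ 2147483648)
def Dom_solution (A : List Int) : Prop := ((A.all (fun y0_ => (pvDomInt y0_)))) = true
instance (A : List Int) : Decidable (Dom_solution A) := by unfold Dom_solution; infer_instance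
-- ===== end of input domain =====

-- B replaces A's per-step rebuild of a whole demand set by a single countdown scalar over the
-- sorted list (objective: faster). Both Pythons sort the argument list in place (same mutation);
-- the equivalence proved here is about the return value.

-- ===== PORT A =====
-- '{demand - 1 for demand in demands}' after 'demands.add(guestDemand)' (set comprehension over a set)
def solutionNext (S : PySem.Set Int) (d : Int) : PySem.Set Int :=
  PySem.Set.ofList ((PySem.Set.add S d).map (fun v => v - 1))

-- one iteration of A's for-loop: add the demand, decrement the whole set, clear on 0
def solutionStepA (st : Int × PySem.Set Int) (d : Int) : Int × PySem.Set Int :=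
  if (0 : Int) ∈ solutionNext st.2 d then (st.1 + 1, PySem.Set.empty)
  else (st.1, solutionNext st.2 d)

def solution (A : List Int) : Int :=
  let L := PySem.List.sorted A (fun x => x) false
  let st := L.foldl solutionStepA ((0 : Int), PySem.Set.empty)
  if st.2.length ≠ 0 then st.1 + 1 else st.1

-- ===== PORT B =====
-- one iteration of B's for-loop over (rooms, countdown, open_group)
def solutionStepB (st : Int × Option Int × Bool) (d : Int) : Int × Option Int × Bool :=
  let c0 : Option Int := match st.2.1 with
    | none => if 1 ≤ d then some d else none
    | some k => some k
  match c0 with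
  | none => (st.1, none, true)
  | some k => if k - 1 = 0 then (st.1 + 1, none, false) else (st.1, some (k - 1), true)

def solution_alt (A : List Int) : Int :=
  let L := PySem.List.sorted A (fun x => x) false
  let st := L.foldl solutionStepB ((0 : Int), none, false)
  if st.2.2 = true then st.1 + 1 else st.1

-- ===== PRECONDITION & SPEC =====
def Spec_solution (A : List Int) (out : Int) : Prop := out = solution_alt A
instance (A : List Int) (out : Int) : Decidable (Spec_solution A out) := by unfold Spec_solution; infer_instance

-- ===== CLAIM (what is proved, stated in full; the proofs are below) =====
def Claim_equal_solution : Prop := ∀ (A : List Int), Dom_solution A → Spec_solution A (solution A)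

-- ===== LEMMAS AND PROOFS =====

-- the relation between A's set and B's countdown: cd is the least element ≥ 1 of S (none if none)
def InvCD (S : List Int) (cd : Option Int) : Prop :=
  match cd with
  | none => ∀ v ∈ S, v ≤ 0
  | some k => 1 ≤ k ∧ k ∈ S ∧ ∀ v ∈ S, 1 ≤ v → k ≤ v

lemma mem_solutionNext (S : PySem.Set Int) (d : Int) (v' : Int) :
    v' ∈ solutionNext S d ↔ ∃ v, (v ∈ S ∨ v = d) ∧ v - 1 = v' := by
  simp [solutionNext, PySem.Set.mem_ofList, List.mem_map, PySem.Set.mem_add]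

lemma zero_mem_solutionNext (S : PySem.Set Int) (d : Int) :
    ((0 : Int) ∈ solutionNext S d) ↔ (1 ∈ S ∨ d = 1) := by
  rw [mem_solutionNext]
  constructor
  · rintro ⟨v, hv | hv, h0⟩
    · left; have : v = 1 := by omega
      simpa [this] using hv
    · right; omega
  · rintro (h | h)
    · exact ⟨1, Or.inl h, by norm_num⟩
    · exact ⟨d, Or.inr rfl, by omega⟩

lemma solutionNext_ne_nil (S : PySem.Set Int) (d : Int) : solutionNext S d ≠ [] := by
  intro h
  have : (d - 1) ∈ solutionNext S d := (mem_solutionNext S d (d-1)).mpr ⟨d, Or.inr rfl, rfl⟩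
  rw [h] at this; simp at this

lemma loop_eq (L : List Int) : ∀ (c : Int) (S : PySem.Set Int) (cd : Option Int) (og : Bool),
    L.Pairwise (· ≤ ·) →
    (∀ v ∈ S, ∀ d ∈ L, v ≤ d) →
    InvCD S cd →
    (og = true ↔ S ≠ []) →
    (let st := L.foldl solutionStepA (c, S)
     if st.2.length ≠ 0 then st.1 + 1 else st.1)
      = (let st := L.foldl solutionStepB (c, cd, og)
         if st.2.2 = true then st.1 + 1 else st.1) := by
  induction L with
  | nil =>
      intro c S cd og _ _ _ hog
      simp only [List.foldl_nil]
      by_cases h : S = [] <;> simp_all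
  | cons d t ih =>
      intro c S cd og hpw hbd hinv hog
      have hdt : ∀ d' ∈ t, d ≤ d' := (List.pairwise_cons.mp hpw).1
      have hpwt : t.Pairwise (· ≤ ·) := (List.pairwise_cons.mp hpw).2
      have hbd2 : ∀ v ∈ S, v ≤ d := fun v hv => hbd v hv d (List.mem_cons_self)
      simp only [List.foldl_cons]
      -- shared facts for the no-trigger case
      have hbd' : ¬ ((0:Int) ∈ solutionNext S d) → ∀ v' ∈ solutionNext S d, ∀ d' ∈ t, v' ≤ d' := by
        intro _ v' hv' d' hd'
        obtain ⟨v, hv, rfl⟩ := (mem_solutionNext S d v').mp hv'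
        rcases hv with hv | rfl
        · have := hbd v hv d' (List.mem_cons_of_mem _ hd'); omega
        · have := hdt d' hd'; omega
      have hogT : (true = true ↔ solutionNext S d ≠ []) := by
        simp [solutionNext_ne_nil S d]
      cases cd with
      | none =>
          have hSle : ∀ v ∈ S, v ≤ 0 := hinv
          have h1S : (1 : Int) ∉ S := fun h => by have := hSle 1 h; omega
          by_cases hd1 : d = 1
          · -- trigger on both sides
            have htr : ((0:Int) ∈ solutionNext S d) := (zero_mem_solutionNext S d).mpr (Or.inr hd1)
            have hA : solutionStepA (c, S) d = (c + 1, PySem.Set.empty) := by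
              simp only [solutionStepA]; rw [if_pos htr]
            have hB : solutionStepB (c, none, og) d = (c + 1, none, false) := by
              simp [solutionStepB, hd1]
            rw [hA, hB]
            exact ih (c+1) PySem.Set.empty none false hpwt
              (by intro v hv; simp [PySem.Set.empty] at hv)
              (by intro v hv; simp [PySem.Set.empty] at hv)
              (by simp [PySem.Set.empty])
          · -- no trigger in A
            have hno : ¬ ((0:Int) ∈ solutionNext S d) := by
              rw [zero_mem_solutionNext]
              rintro (h | h)
              · exact h1S h
              · exact hd1 h
            have hA : solutionStepA (c, S) d = (c, solutionNext S d) := by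
              simp only [solutionStepA]; rw [if_neg hno]
            rw [hA]
            by_cases hdp : 1 ≤ d
            · -- countdown starts at d; d ≥ 2 so no clear
              have hne : ¬ (d - 1 = 0) := by omega
              have hB : solutionStepB (c, none, og) d = (c, some (d - 1), true) := by
                simp [solutionStepB, hdp, hne]
              rw [hB]
              apply ih _ _ _ _ hpwt (hbd' hno) _ hogT
              refine ⟨by omega, (mem_solutionNext S d (d-1)).mpr ⟨d, Or.inr rfl, rfl⟩, ?_⟩
              intro v' hv' h1v'
              obtain ⟨v, hv, rfl⟩ := (mem_solutionNext S d v').mp hv'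
              rcases hv with hv | rfl
              · have := hSle v hv; omega
              · omega
            · -- d ≤ 0: countdown stays none
              have hB : solutionStepB (c, none, og) d = (c, none, true) := by
                simp [solutionStepB, hdp]
              rw [hB]
              apply ih _ _ _ _ hpwt (hbd' hno) _ hogT
              intro v' hv'
              obtain ⟨v, hv, rfl⟩ := (mem_solutionNext S d v').mp hv'
              rcases hv with hv | rfl
              · have := hSle v hv; omega
              · omega
      | some k =>
          obtain ⟨hk1, hkS, hkmin⟩ := hinv
          have hkd : k ≤ d := hbd2 k hkS
          have h1S : (1 : Int) ∈ S ↔ k = 1 := by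
            constructor
            · intro h; have := hkmin 1 h (by norm_num); omega
            · intro h; rwa [h] at hkS
          by_cases hk : k = 1
          · -- trigger on both sides
            have htr : ((0:Int) ∈ solutionNext S d) := (zero_mem_solutionNext S d).mpr (Or.inl (h1S.mpr hk))
            have hA : solutionStepA (c, S) d = (c + 1, PySem.Set.empty) := by
              simp only [solutionStepA]; rw [if_pos htr]
            have hB : solutionStepB (c, some k, og) d = (c + 1, none, false) := by
              simp [solutionStepB, hk]
            rw [hA, hB]
            exact ih (c+1) PySem.Set.empty none false hpwt
              (by intro v hv; simp [PySem.Set.empty] at hv)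
              (by intro v hv; simp [PySem.Set.empty] at hv)
              (by simp [PySem.Set.empty])
          · -- no trigger: k ≥ 2, countdown becomes k-1
            have hno : ¬ ((0:Int) ∈ solutionNext S d) := by
              rw [zero_mem_solutionNext]
              rintro (h | h)
              · exact hk (h1S.mp h)
              · omega
            have hne : ¬ (k - 1 = 0) := by omega
            have hA : solutionStepA (c, S) d = (c, solutionNext S d) := by
              simp only [solutionStepA]; rw [if_neg hno]
            have hB : solutionStepB (c, some k, og) d = (c, some (k - 1), true) := by
              simp [solutionStepB, hne]
            rw [hA, hB]
            apply ih _ _ _ _ hpwt (hbd' hno) _ hogT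
            refine ⟨by omega, (mem_solutionNext S d (k-1)).mpr ⟨k, Or.inl hkS, rfl⟩, ?_⟩
            intro v' hv' h1v'
            obtain ⟨v, hv, rfl⟩ := (mem_solutionNext S d v').mp hv'
            rcases hv with hv | rfl
            · have := hkmin v hv (by omega); omega
            · omega

-- ===== VERDICT (by name: the statement is the Claim_ definition above) =====
theorem solution_spec : Claim_equal_solution := by
  intro A _
  unfold Spec_solution solution solution_alt
  exact loop_eq (PySem.List.sorted A (fun x => x) false) 0 PySem.Set.empty none false
    (PySem.List.sorted_pairwise A (fun x => x))
    (by intro v hv; simp [PySem.Set.empty] at hv)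
    (by intro v hv; simp [PySem.Set.empty] at hv)
    (by simp [PySem.Set.empty])
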